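-- pv_equiv track=rewrite | github.com/yadavsaroja2005-afk/apnacollege-demo- | rbfs.py | rbfs_search
-- ===== SOURCE A (Python) =====
-- india_map = {
--     'Mumbai': {'Pune': 150, 'Surat': 280, 'Indore': 585},
--     'Pune': {'Mumbai': 150, 'Hyderabad': 560},
--     'Surat': {'Mumbai': 280, 'Ahmedabad': 265},
--     'Indore': {'Mumbai': 585, 'Bhopal': 195},
--     'Hyderabad': {'Pune': 560, 'Bangalore': 570},
--     'Ahmedabad': {'Surat': 265, 'Jaipur': 675},
--     'Bhopal': {'Indore': 195, 'Nagpur': 350},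
--     'Bangalore': {'Hyderabad': 570, 'Chennai': 345},
--     'Nagpur': {'Bhopal': 350, 'Raipur': 285},
--     'Raipur': {'Nagpur': 285, 'Bhubaneswar': 505},
--     'Bhubaneswar': {'Raipur': 505, 'Kolkata': 440},
--     'Jaipur': {'Ahmedabad': 675, 'Delhi': 270},
--     'Chennai': {'Bangalore': 345, 'Hyderabad': 630},
--     'Kolkata': {'Bhubaneswar': 440, 'Patna': 580},
--     'Patna': {'Kolkata': 580, 'Delhi': 1050},
--     'Delhi': {'Jaipur': 270, 'Patna': 1050}
-- }
--
-- heuristics = {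
--     'Mumbai': 1400,
--     'Pune': 1380,
--     'Surat': 1200,
--     'Indore': 800,
--     'Hyderabad': 1500,
--     'Ahmedabad': 900,
--     'Bhopal': 700,
--     'Bangalore': 1800,
--     'Nagpur': 1200,
--     'Raipur': 1100,
--     'Bhubaneswar': 1500,
--     'Jaipur': 260,
--     'Chennai': 1900,
--     'Kolkata': 1600,
--     'Patna': 1000,
--     'Delhi': 0
-- }
--
-- def rbfs_search(current_city, goal_city, path, f_limit):
--     if current_city == goal_city:
--         return path
--
--     successors = india_map.get(current_city, {})
--     if not successors:
--         return None
--
--     sorted_successors = sorted(successors, key=lambda x: successors[x] + heuristics[x])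
--
--     for city in sorted_successors:
--         new_path = path + [city]
--         f_value = successors[city] + heuristics[city]
--
--         if f_value > f_limit:
--             continue  # Skip this path, not within current f_limit
--
--         result = rbfs_search(city, goal_city, new_path, min(f_limit, f_value))
--         if result is not None:
--             return result
--
--     return None
-- ===== SOURCE B (Python) =====
-- india_map = {
--     'Mumbai': {'Pune': 150, 'Surat': 280, 'Indore': 585},
--     'Pune': {'Mumbai': 150, 'Hyderabad': 560},
--     'Surat': {'Mumbai': 280, 'Ahmedabad': 265},
--     'Indore': {'Mumbai': 585, 'Bhopal': 195},
--     'Hyderabad': {'Pune': 560, 'Bangalore': 570},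
--     'Ahmedabad': {'Surat': 265, 'Jaipur': 675},
--     'Bhopal': {'Indore': 195, 'Nagpur': 350},
--     'Bangalore': {'Hyderabad': 570, 'Chennai': 345},
--     'Nagpur': {'Bhopal': 350, 'Raipur': 285},
--     'Raipur': {'Nagpur': 285, 'Bhubaneswar': 505},
--     'Bhubaneswar': {'Raipur': 505, 'Kolkata': 440},
--     'Jaipur': {'Ahmedabad': 675, 'Delhi': 270},
--     'Chennai': {'Bangalore': 345, 'Hyderabad': 630},
--     'Kolkata': {'Bhubaneswar': 440, 'Patna': 580},
--     'Patna': {'Kolkata': 580, 'Delhi': 1050},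
--     'Delhi': {'Jaipur': 270, 'Patna': 1050}
-- }
--
-- heuristics = {
--     'Mumbai': 1400,
--     'Pune': 1380,
--     'Surat': 1200,
--     'Indore': 800,
--     'Hyderabad': 1500,
--     'Ahmedabad': 900,
--     'Bhopal': 700,
--     'Bangalore': 1800,
--     'Nagpur': 1200,
--     'Raipur': 1100,
--     'Bhubaneswar': 1500,
--     'Jaipur': 260,
--     'Chennai': 1900,
--     'Kolkata': 1600,
--     'Patna': 1000,
--     'Delhi': 0
-- }
--
-- def rbfs_search(current_city, goal_city, path, f_limit):
--     # Iterative depth-first search with an explicit stack of (city, path, limit)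
--     # frames instead of recursion.  Successors are pushed in reverse sorted
--     # order so the LIFO pops explore them in ascending f-value, and a pushed
--     # frame's limit is its own f-value (which is <= the current limit).
--     stack = [(current_city, path, f_limit)]
--     while stack:
--         city, p, limit = stack.pop()
--         if city == goal_city:
--             return p
--         successors = india_map.get(city, {})
--         for s in reversed(sorted(successors, key=lambda x: successors[x] + heuristics[x])):
--             f_value = successors[s] + heuristics[s]
--             if f_value <= limit:
--                 stack.append((s, p + [s], f_value))
--     return None
-- ===== Notes on version B (the rewrite author's own statement) =====
-- stated objective: alternative
-- what changed: Replaces A's recursive best-first DFS with an iterative loop over an explicit stack of (city, path, limit) frames, pushing admissible successors in reverse sorted order so LIFO pops reproduce A's exploration order; the pushed limit is the successor's own f-value since min(f_limit, f_value) = f_value for admitted successors.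
import Mathlib
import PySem

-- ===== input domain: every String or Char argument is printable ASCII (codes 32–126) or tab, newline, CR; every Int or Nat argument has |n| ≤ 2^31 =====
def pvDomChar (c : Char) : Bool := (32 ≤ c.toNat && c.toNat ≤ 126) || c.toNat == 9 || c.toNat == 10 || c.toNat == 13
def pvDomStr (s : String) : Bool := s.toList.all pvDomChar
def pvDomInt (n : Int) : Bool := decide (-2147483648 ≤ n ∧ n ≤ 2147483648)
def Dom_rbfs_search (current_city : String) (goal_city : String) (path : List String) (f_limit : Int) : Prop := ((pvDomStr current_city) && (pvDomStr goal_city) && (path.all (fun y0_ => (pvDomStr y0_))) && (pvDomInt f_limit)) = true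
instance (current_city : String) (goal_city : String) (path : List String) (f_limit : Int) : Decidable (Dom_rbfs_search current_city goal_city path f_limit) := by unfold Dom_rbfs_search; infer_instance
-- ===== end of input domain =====

-- B replaces A's recursive best-first DFS by an iterative loop over an explicit stack
-- of (city, path, limit) frames (objective: alternative decomposition, same cost).
-- Both Lean ports carry a fuel counter purely as a termination guard; it is never
-- exhausted (the search tree over the fixed 16-city graph has at most 43 nodes).

-- ===== PORT A =====
def pvIndiaMap : PySem.Dict String (PySem.Dict String Int) := PySem.Dict.ofList [
  ("Mumbai", PySem.Dict.ofList [("Pune", 150), ("Surat", 280), ("Indore", 585)]),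
  ("Pune", PySem.Dict.ofList [("Mumbai", 150), ("Hyderabad", 560)]),
  ("Surat", PySem.Dict.ofList [("Mumbai", 280), ("Ahmedabad", 265)]),
  ("Indore", PySem.Dict.ofList [("Mumbai", 585), ("Bhopal", 195)]),
  ("Hyderabad", PySem.Dict.ofList [("Pune", 560), ("Bangalore", 570)]),
  ("Ahmedabad", PySem.Dict.ofList [("Surat", 265), ("Jaipur", 675)]),
  ("Bhopal", PySem.Dict.ofList [("Indore", 195), ("Nagpur", 350)]),
  ("Bangalore", PySem.Dict.ofList [("Hyderabad", 570), ("Chennai", 345)]),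
  ("Nagpur", PySem.Dict.ofList [("Bhopal", 350), ("Raipur", 285)]),
  ("Raipur", PySem.Dict.ofList [("Nagpur", 285), ("Bhubaneswar", 505)]),
  ("Bhubaneswar", PySem.Dict.ofList [("Raipur", 505), ("Kolkata", 440)]),
  ("Jaipur", PySem.Dict.ofList [("Ahmedabad", 675), ("Delhi", 270)]),
  ("Chennai", PySem.Dict.ofList [("Bangalore", 345), ("Hyderabad", 630)]),
  ("Kolkata", PySem.Dict.ofList [("Bhubaneswar", 440), ("Patna", 580)]),
  ("Patna", PySem.Dict.ofList [("Kolkata", 580), ("Delhi", 1050)]),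
  ("Delhi", PySem.Dict.ofList [("Jaipur", 270), ("Patna", 1050)])]

def pvHeuristics : PySem.Dict String Int := PySem.Dict.ofList [
  ("Mumbai", 1400), ("Pune", 1380), ("Surat", 1200), ("Indore", 800),
  ("Hyderabad", 1500), ("Ahmedabad", 900), ("Bhopal", 700), ("Bangalore", 1800),
  ("Nagpur", 1200), ("Raipur", 1100), ("Bhubaneswar", 1500), ("Jaipur", 260),
  ("Chennai", 1900), ("Kolkata", 1600), ("Patna", 1000), ("Delhi", 0)]

-- successors[x] + heuristics[x]: both lookups always succeed in the Python (x ranges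
-- over the successor dict's own keys, and every successor city is a key of
-- heuristics), so getD with default 0 is exact here.
def pvFVal (succs : PySem.Dict String Int) (x : String) : Int :=
  PySem.Dict.getD succs x 0 + PySem.Dict.getD pvHeuristics x 0

mutual
-- literal transliteration of A's body; the Nat argument is fuel, the termination guard
def rbfsGo : Nat → String → String → List String → Int → Option (List String)
  | 0, _, _, _, _ => none
  | Nat.succ n, current_city, goal_city, path, f_limit =>
    if current_city == goal_city then some path
    else
      let successors := PySem.Dict.getD pvIndiaMap current_city PySem.Dict.empty
      if successors.items.isEmpty then none
      else
        let sorted_successors := PySem.List.sorted (PySem.Dict.keys successors)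
          (fun x => pvFVal successors x) false
        rbfsLoop n goal_city path f_limit successors sorted_successors
  termination_by n _ _ _ _ => (n, 0, 0)

-- A's `for city in sorted_successors` loop with its early return
def rbfsLoop : Nat → String → List String → Int → PySem.Dict String Int → List String → Option (List String)
  | _, _, _, _, _, [] => none
  | n, goal_city, path, f_limit, successors, city :: rest =>
    let new_path := path ++ [city]
    let f_value := pvFVal successors city
    if f_value > f_limit then rbfsLoop n goal_city path f_limit successors rest
    else
      match rbfsGo n city goal_city new_path (min f_limit f_value) with
      | some result => some result
      | none => rbfsLoop n goal_city path f_limit successors rest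
  termination_by n _ _ _ _ rest => (n, 1, rest.length)
end

def rbfs_search (current_city : String) (goal_city : String) (path : List String) (f_limit : Int) : Option (List String) :=
  rbfsGo 100 current_city goal_city path f_limit

-- ===== PORT B =====
-- termination measure for the stack loop: each frame weighs 4^fuel
def pvMeasure : List (String × List String × Int × Nat) → Nat
  | [] => 0
  | (_, _, _, n) :: t => 4 ^ n + pvMeasure t

lemma pvMeasure_foldl (m : Nat)
    (push : List (String × List String × Int × Nat) → String → List (String × List String × Int × Nat))
    (hpush : ∀ st s, pvMeasure (push st s) ≤ 4 ^ m + pvMeasure st) :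
    ∀ (L : List String) (st : List (String × List String × Int × Nat)),
      pvMeasure (L.foldl push st) ≤ L.length * 4 ^ m + pvMeasure st := by
  intro L
  induction L with
  | nil => intro st; simp
  | cons x L ih =>
    intro st
    calc pvMeasure ((x :: L).foldl push st) = pvMeasure (L.foldl push (push st x)) := rfl
      _ ≤ L.length * 4 ^ m + pvMeasure (push st x) := ih _
      _ ≤ L.length * 4 ^ m + (4 ^ m + pvMeasure st) := by have := hpush st x; omega
      _ = (x :: L).length * 4 ^ m + pvMeasure st := by simp [List.length_cons]; ring

lemma pvGetD_values {κ ν : Type} [BEq κ] (d : PySem.Dict κ ν) (k : κ) (dflt : ν) :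
    PySem.Dict.getD d k dflt = dflt ∨ PySem.Dict.getD d k dflt ∈ d.values := by
  cases h : PySem.Dict.get? d k with
  | none => left; simp [PySem.Dict.getD_eq_get?_getD, h]
  | some v =>
    right
    rw [PySem.Dict.getD_eq_get?_getD, h]
    unfold PySem.Dict.get? at h
    rcases Option.map_eq_some_iff.mp h with ⟨p, hfind, rfl⟩
    exact List.mem_map_of_mem (List.mem_of_find?_eq_some hfind)

-- every successor dict of the fixed map has at most 3 entries
lemma pvSucc_small (c : String) :
    (PySem.Dict.getD pvIndiaMap c PySem.Dict.empty).keys.length ≤ 3 := by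
  rcases pvGetD_values pvIndiaMap c PySem.Dict.empty with h | h
  · rw [h]; decide
  · exact (by decide : ∀ X ∈ pvIndiaMap.values, (PySem.Dict.keys X).length ≤ 3) _ h

-- Source B's while-loop over the explicit stack; each frame additionally carries fuel,
-- the termination guard (never exhausted with initial fuel 100)
def rbfsStack : String → List (String × List String × Int × Nat) → Option (List String)
  | _, [] => none
  | goal_city, (city, p, limit, n) :: rest =>
    match n with
    | 0 => rbfsStack goal_city rest
    | Nat.succ m =>
      if city == goal_city then some p
      else
        let successors := PySem.Dict.getD pvIndiaMap city PySem.Dict.empty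
        let sorted_successors := PySem.List.sorted (PySem.Dict.keys successors)
          (fun x => pvFVal successors x) false
        rbfsStack goal_city (sorted_successors.reverse.foldl
          (fun st s => if pvFVal successors s ≤ limit then (s, p ++ [s], pvFVal successors s, m) :: st else st) rest)
  termination_by _ st => pvMeasure st
  decreasing_by
  · simp only [pvMeasure]; omega
  · simp only [pvMeasure]
    have hb : ∀ st s, pvMeasure ((fun st s => if pvFVal (PySem.Dict.getD pvIndiaMap city PySem.Dict.empty) s ≤ limit then (s, p ++ [s], pvFVal (PySem.Dict.getD pvIndiaMap city PySem.Dict.empty) s, m) :: st else st) st s) ≤ 4 ^ m + pvMeasure st := by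
      intro st s
      by_cases hc : pvFVal (PySem.Dict.getD pvIndiaMap city PySem.Dict.empty) s ≤ limit
      · simp [hc, pvMeasure]
      · simp [hc]
    have h := pvMeasure_foldl m _ hb
      ((PySem.List.sorted (PySem.Dict.keys (PySem.Dict.getD pvIndiaMap city PySem.Dict.empty)) (fun x => pvFVal (PySem.Dict.getD pvIndiaMap city PySem.Dict.empty) x) false).reverse) rest
    have hlen : ((PySem.List.sorted (PySem.Dict.keys (PySem.Dict.getD pvIndiaMap city PySem.Dict.empty)) (fun x => pvFVal (PySem.Dict.getD pvIndiaMap city PySem.Dict.empty) x) false).reverse).length ≤ 3 := by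
      rw [List.length_reverse, PySem.List.length_sorted]
      exact pvSucc_small city
    have hpow : 0 < 4 ^ m := Nat.pow_pos (by norm_num)
    calc pvMeasure _ ≤ _ := h
      _ ≤ 3 * 4 ^ m + pvMeasure rest := by have := Nat.mul_le_mul_right (4 ^ m) hlen; omega
      _ < 4 ^ (m + 1) + pvMeasure rest := by rw [pow_succ]; omega

def rbfs_search_alt (current_city : String) (goal_city : String) (path : List String) (f_limit : Int) : Option (List String) :=
  rbfsStack goal_city [(current_city, path, f_limit, 100)]

-- ===== PRECONDITION & SPEC =====
def Spec_rbfs_search (current_city : String) (goal_city : String) (path : List String) (f_limit : Int) (out : Option (List String)) : Prop := out = rbfs_search_alt current_city goal_city path f_limit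
instance (current_city : String) (goal_city : String) (path : List String) (f_limit : Int) (out : Option (List String)) : Decidable (Spec_rbfs_search current_city goal_city path f_limit out) := by unfold Spec_rbfs_search; infer_instance

-- ===== CLAIM (what is proved, stated in full; the proofs are below) =====
def Claim_equal_rbfs_search : Prop := ∀ (current_city : String) (goal_city : String) (path : List String) (f_limit : Int), Dom_rbfs_search current_city goal_city path f_limit → Spec_rbfs_search current_city goal_city path f_limit (rbfs_search current_city goal_city path f_limit)

-- ===== LEMMAS AND PROOFS =====

-- first non-None result of a list of searches (proof-only device)
def pvFirst : List (Option (List String)) → Option (List String)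
  | [] => none
  | o :: t => match o with | some r => some r | none => pvFirst t

lemma pvFirst_append (A B : List (Option (List String))) :
    pvFirst (A ++ B) = match pvFirst A with | some r => some r | none => pvFirst B := by
  induction A with
  | nil => simp [pvFirst]
  | cons o t ih => cases o <;> simp [pvFirst, ih]

-- A's for-loop computes the first non-None recursive result over the admitted successors
lemma pvLoop_eq (n : Nat) (g : String) (succs : PySem.Dict String Int) :
    ∀ (ks : List String) (p : List String) (l : Int),
      rbfsLoop n g p l succs ks =
        pvFirst ((ks.filter (fun s => decide (pvFVal succs s ≤ l))).map
          (fun s => rbfsGo n s g (p ++ [s]) (pvFVal succs s))) := by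
  intro ks
  induction ks with
  | nil => intro p l; simp [rbfsLoop, pvFirst]
  | cons s ks ih =>
    intro p l
    rw [List.filter_cons]
    by_cases hle : pvFVal succs s ≤ l
    · have h : ¬ pvFVal succs s > l := not_lt.mpr hle
      have hmin : min l (pvFVal succs s) = pvFVal succs s := min_eq_right hle
      simp only [rbfsLoop, if_neg h, hmin, hle, decide_true, if_true, List.map_cons, pvFirst]
      cases hgo : rbfsGo n s g (p ++ [s]) (pvFVal succs s) <;> simp [ih]
    · have h : pvFVal succs s > l := lt_of_not_ge hle
      simp only [rbfsLoop, if_pos h, hle, decide_false, ih]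
      simp

-- pushing the admissible successors in reverse sorted order prepends their frames in sorted order
lemma pvPush_eq (succs : PySem.Dict String Int) (p : List String) (l : Int) (m : Nat) :
    ∀ (L : List String) (rest : List (String × List String × Int × Nat)),
      L.reverse.foldl (fun st s => if pvFVal succs s ≤ l then (s, p ++ [s], pvFVal succs s, m) :: st else st) rest =
        (L.filter (fun s => decide (pvFVal succs s ≤ l))).map (fun s => (s, p ++ [s], pvFVal succs s, m)) ++ rest := by
  intro L
  induction L with
  | nil => intro rest; simp
  | cons x L ih =>
    intro rest
    rw [List.reverse_cons, List.foldl_append]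
    simp only [List.foldl_cons, List.foldl_nil, ih, List.filter_cons]
    by_cases hc : pvFVal succs x ≤ l <;> simp [hc]

-- the stack loop returns the first non-None result of running A's search on each frame
lemma pvFirst_cons_first (X t : List (Option (List String))) :
    pvFirst (pvFirst X :: t) = pvFirst (X ++ t) := by
  rw [pvFirst_append]; cases h : pvFirst X <;> simp [pvFirst]

lemma pvStack_eq :
    ∀ (g : String) (st : List (String × List String × Int × Nat)),
      rbfsStack g st = pvFirst (st.map (fun fr => rbfsGo fr.2.2.2 fr.1 g fr.2.1 fr.2.2.1)) := by
  intro g st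
  induction g, st using rbfsStack.induct with
  | case1 g => simp [rbfsStack, pvFirst]
  | case2 g c p l rest ih =>
    simp only [rbfsStack, List.map_cons]
    simpa [pvFirst, rbfsGo] using ih
  | case3 g c p l rest m hc =>
    simp [rbfsStack, hc, rbfsGo, pvFirst]
  | case4 g c p l rest m hc S K ih =>
    simp only [rbfsStack, if_neg hc]
    simp only [S, K, dite_eq_ite] at ih
    rw [ih, pvPush_eq]
    have hgo : rbfsGo (Nat.succ m) c g p l =
        pvFirst (((PySem.List.sorted (PySem.Dict.keys (PySem.Dict.getD pvIndiaMap c PySem.Dict.empty))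
            (fun x => pvFVal (PySem.Dict.getD pvIndiaMap c PySem.Dict.empty) x) false).filter
              (fun s => decide (pvFVal (PySem.Dict.getD pvIndiaMap c PySem.Dict.empty) s ≤ l))).map
          (fun s => rbfsGo m s g (p ++ [s]) (pvFVal (PySem.Dict.getD pvIndiaMap c PySem.Dict.empty) s))) := by
      simp only [rbfsGo, if_neg hc]
      by_cases he : (PySem.Dict.getD pvIndiaMap c PySem.Dict.empty).items.isEmpty
      · have hK : PySem.Dict.keys (PySem.Dict.getD pvIndiaMap c PySem.Dict.empty) = [] := by
          simp only [PySem.Dict.keys]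
          rw [List.isEmpty_iff.mp he]
          rfl
        have hs : PySem.List.sorted (PySem.Dict.keys (PySem.Dict.getD pvIndiaMap c PySem.Dict.empty))
            (fun x => pvFVal (PySem.Dict.getD pvIndiaMap c PySem.Dict.empty) x) false = [] :=
          (PySem.List.sorted_eq_nil_iff _ _ _).mpr hK
        simp [he, hs, pvFirst]
      · simp only [he, Bool.false_eq_true, if_false]
        exact pvLoop_eq m g _ _ p l
    rw [List.map_cons, hgo, pvFirst_cons_first, List.map_append, List.map_map]
    rfl

-- ===== VERDICT (by name: the statement is the Claim_ definition above) =====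
theorem rbfs_search_spec : Claim_equal_rbfs_search := by
  intro c g p l _
  unfold Spec_rbfs_search rbfs_search rbfs_search_alt
  rw [pvStack_eq]
  simp only [List.map_cons, List.map_nil]
  cases rbfsGo 100 c g p l <;> simp [pvFirst]
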